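-- pv_equiv track=rewrite | github.com/alialzein01/social-media-analytics | app/analytics/metrics.py | analyze_reactions
-- ===== SOURCE A (Python) =====
-- from typing import Dict, List, Optional, Any, Tuple
--
-- def analyze_reactions(posts: List[Dict]) -> Dict[str, int]:
--     """
--     Analyze reaction breakdown across all posts.
--
--     Args:
--         posts: List of Facebook posts
--
--     Returns:
--         Dictionary of reaction type -> total count
--     """
--     total_reactions = {
--         'like': 0,
--         'love': 0,
--         'haha': 0,
--         'wow': 0,
--         'sad': 0,
--         'angry': 0
--     }
--
--     for post in posts:
--         reactions = post.get('reactions', {})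
--         if isinstance(reactions, dict):
--             for reaction_type, count in reactions.items():
--                 if reaction_type in total_reactions:
--                     total_reactions[reaction_type] += count
--
--     return total_reactions
-- ===== SOURCE B (Python) =====
-- def analyze_reactions(posts):
--     """Analyze reaction breakdown across all posts (transposed: one total per type)."""
--     return {
--         t: sum(r.get(t, 0)
--                for p in posts
--                for r in [p.get('reactions', {})]
--                if isinstance(r, dict))
--         for t in ('like', 'love', 'haha', 'wow', 'sad', 'angry')
--     }
-- ===== Notes on version B (the rewrite author's own statement) =====
-- stated objective: alternative
-- what changed: Transposes the nested loops: instead of one pass over posts accumulating into a mutable dict, B computes each of the six reaction totals independently as a per-type sum over all posts, building the result dict in one comprehension.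
import Mathlib
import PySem

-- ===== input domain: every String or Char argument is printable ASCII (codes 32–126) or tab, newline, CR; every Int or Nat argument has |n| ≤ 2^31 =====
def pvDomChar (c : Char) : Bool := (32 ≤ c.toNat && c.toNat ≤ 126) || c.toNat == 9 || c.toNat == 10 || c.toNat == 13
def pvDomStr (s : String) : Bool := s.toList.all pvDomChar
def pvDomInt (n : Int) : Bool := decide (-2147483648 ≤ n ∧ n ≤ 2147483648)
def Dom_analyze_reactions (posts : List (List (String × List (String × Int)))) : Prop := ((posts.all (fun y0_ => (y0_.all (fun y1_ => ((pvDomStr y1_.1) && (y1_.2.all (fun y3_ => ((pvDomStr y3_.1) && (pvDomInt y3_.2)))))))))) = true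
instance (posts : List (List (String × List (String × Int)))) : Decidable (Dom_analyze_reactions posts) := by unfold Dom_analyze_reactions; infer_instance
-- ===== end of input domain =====

-- B transposes A's post-scan-with-accumulator into one independent sum per fixed reaction type (objective: alternative decomposition).

-- ===== PORT A =====
-- literal port: the six-key literal dict, a pass over posts, inner pass over reactions.items()
-- (the isinstance(reactions, dict) guard is always true under the typed convention: the
-- 'reactions' value is List (String × Int), i.e. a dict)
def analyze_reactions (posts : List (List (String × List (String × Int)))) : List (String × Int) :=
  let total0 : PySem.Dict String Int :=
    PySem.Dict.ofList [("like", 0), ("love", 0), ("haha", 0), ("wow", 0), ("sad", 0), ("angry", 0)]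
  let total := posts.foldl (fun total post =>
    let reactions := PySem.Dict.ofList ((PySem.Dict.ofList post).getD "reactions" [])
    reactions.items.foldl (fun total rc =>
      if total.contains rc.1 then total.insert rc.1 (total.getD rc.1 0 + rc.2) else total) total) total0
  total.items

-- ===== PORT B =====
def analyze_reactions_alt (posts : List (List (String × List (String × Int)))) : List (String × Int) :=
  ["like", "love", "haha", "wow", "sad", "angry"].map (fun t =>
    (t, (posts.map (fun p =>
      (PySem.Dict.ofList ((PySem.Dict.ofList p).getD "reactions" [])).getD t 0)).sum))

-- ===== PRECONDITION & SPEC =====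
def Spec_analyze_reactions (posts : List (List (String × List (String × Int)))) (out : List (String × Int)) : Prop := out = analyze_reactions_alt posts
instance (posts : List (List (String × List (String × Int)))) (out : List (String × Int)) : Decidable (Spec_analyze_reactions posts out) := by unfold Spec_analyze_reactions; infer_instance

-- ===== CLAIM (what is proved, stated in full; the proofs are below) =====
def Claim_equal_analyze_reactions : Prop := ∀ (posts : List (List (String × List (String × Int)))), Dom_analyze_reactions posts → Spec_analyze_reactions posts (analyze_reactions posts)

-- ===== LEMMAS AND PROOFS =====

-- the reactions dict of one post, as A and B both read it
def pvRdict (post : List (String × List (String × Int))) : PySem.Dict String Int :=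
  PySem.Dict.ofList ((PySem.Dict.ofList post).getD "reactions" [])

-- A's inner loop over one post's reactions.items()
def pvInner (total : PySem.Dict String Int) (post : List (String × List (String × Int))) : PySem.Dict String Int :=
  (pvRdict post).items.foldl (fun total rc =>
    if total.contains rc.1 then total.insert rc.1 (total.getD rc.1 0 + rc.2) else total) total

def pvTotal0 : PySem.Dict String Int :=
  PySem.Dict.ofList [("like", 0), ("love", 0), ("haha", 0), ("wow", 0), ("sad", 0), ("angry", 0)]

lemma analyze_reactions_eq (posts : List (List (String × List (String × Int)))) :
    analyze_reactions posts = (posts.foldl pvInner pvTotal0).items := rfl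

lemma keys_loop (l : List (String × Int)) (d : PySem.Dict String Int) :
    (l.foldl (fun total rc =>
      if total.contains rc.1 then total.insert rc.1 (total.getD rc.1 0 + rc.2) else total) d).keys = d.keys := by
  induction l generalizing d with
  | nil => rfl
  | cons p l ih =>
    simp only [List.foldl_cons]
    split_ifs with h
    · rw [ih, PySem.Dict.keys_insert_of_contains _ _ h]
    · exact ih d

lemma getD_loop (l : List (String × Int)) (d : PySem.Dict String Int) (t : String)
    (ht : d.contains t = true) :
    (l.foldl (fun total rc =>
      if total.contains rc.1 then total.insert rc.1 (total.getD rc.1 0 + rc.2) else total) d).getD t 0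
      = d.getD t 0 + ((l.filter (fun p => p.1 == t)).map Prod.snd).sum := by
  induction l generalizing d with
  | nil => simp
  | cons p l ih =>
    obtain ⟨k, v⟩ := p
    simp only [List.foldl_cons]
    by_cases hk : k = t
    · subst hk
      rw [if_pos ht, ih _ (by simp [PySem.Dict.contains_insert_self]),
        PySem.Dict.getD_insert_self]
      simp
      ring
    · have hfil : ((k, v) :: l).filter (fun p => p.1 == t) = l.filter (fun p => p.1 == t) := by
        simp [hk]
      rw [hfil]
      by_cases h : d.contains k
      · rw [if_pos h, ih _ (by rw [PySem.Dict.contains_insert]; simp [ht]),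
          PySem.Dict.getD_insert_of_ne _ _ _ (fun e => hk e.symm)]
      · rw [if_neg h, ih _ ht]

lemma filter_sum_mk (l : List (String × Int)) (t : String) (h : (l.map Prod.fst).Nodup) :
    ((l.filter (fun p => p.1 == t)).map Prod.snd).sum = (PySem.Dict.mk l).getD t 0 := by
  induction l with
  | nil => simp [PySem.Dict.getD, PySem.Dict.get?]
  | cons p l ih =>
    obtain ⟨k, v⟩ := p
    have hnd : (l.map Prod.fst).Nodup := (List.nodup_cons.mp h).2
    have hnotin : k ∉ l.map Prod.fst := (List.nodup_cons.mp h).1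
    rw [PySem.Dict.getD_eq_get?_getD, PySem.Dict.get?_mk_cons]
    by_cases hk : k = t
    · subst hk
      have hfil : l.filter (fun p => p.1 == k) = [] := by
        rw [List.filter_eq_nil_iff]
        intro p hp hpk
        have hpk' : p.1 = k := by simpa using hpk
        exact hnotin (hpk' ▸ List.mem_map.mpr ⟨p, hp, rfl⟩)
      simp [hfil]
    · rw [if_neg (by simpa using hk)]
      rw [← PySem.Dict.getD_eq_get?_getD, ← ih hnd]
      simp [hk]

lemma getD_inner (d : PySem.Dict String Int) (post : List (String × List (String × Int)))
    (t : String) (ht : d.contains t = true) :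
    (pvInner d post).getD t 0 = d.getD t 0 + (pvRdict post).getD t 0 := by
  rw [pvInner, getD_loop _ _ _ ht,
    filter_sum_mk _ _ (by
      have := PySem.Dict.nodup_keys_ofList ((PySem.Dict.ofList post).getD "reactions" [])
      simpa [PySem.Dict.keys, pvRdict] using this)]

lemma keys_inner (d : PySem.Dict String Int) (post : List (String × List (String × Int))) :
    (pvInner d post).keys = d.keys := keys_loop _ _

lemma keys_outer (posts : List (List (String × List (String × Int)))) (d : PySem.Dict String Int) :
    (posts.foldl pvInner d).keys = d.keys := by
  induction posts generalizing d with
  | nil => rfl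
  | cons p ps ih => rw [List.foldl_cons, ih, keys_inner]

lemma contains_inner (d : PySem.Dict String Int) (post : List (String × List (String × Int)))
    (t : String) : (pvInner d post).contains t = d.contains t := by
  rw [PySem.Dict.contains_eq_decide_mem_keys, PySem.Dict.contains_eq_decide_mem_keys, keys_inner]

lemma getD_outer (posts : List (List (String × List (String × Int))))
    (d : PySem.Dict String Int) (t : String) (ht : d.contains t = true) :
    (posts.foldl pvInner d).getD t 0
      = d.getD t 0 + (posts.map (fun p => (pvRdict p).getD t 0)).sum := by
  induction posts generalizing d with
  | nil => simp
  | cons p ps ih =>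
    rw [List.foldl_cons, ih _ (by rw [contains_inner]; exact ht), getD_inner _ _ _ ht]
    simp
    ring

-- ===== VERDICT (by name: the statement is the Claim_ definition above) =====
theorem analyze_reactions_spec : Claim_equal_analyze_reactions := by
  intro posts _
  unfold Spec_analyze_reactions
  rw [analyze_reactions_eq]
  have hkeys : (posts.foldl pvInner pvTotal0).keys = ["like", "love", "haha", "wow", "sad", "angry"] := by
    rw [keys_outer]; decide
  have hnd : (posts.foldl pvInner pvTotal0).keys.Nodup := by rw [hkeys]; decide
  rw [PySem.Dict.items_eq_map_keys _ hnd 0, hkeys]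
  apply List.map_congr_left
  intro t htmem
  have ht : pvTotal0.contains t = true := by
    fin_cases htmem <;> decide
  rw [getD_outer _ _ _ ht]
  have h0 : pvTotal0.getD t 0 = 0 := by
    fin_cases htmem <;> decide
  rw [h0]
  simp [pvRdict]
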